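-- pv_equiv track=rewrite | github.com/liyingbo/liyingbo_challenge | test_valid.py | val_rep
-- ===== SOURCE A (Python) =====
-- def val_rep(num):
--     """ If it has 4 or more consecutive repeated digits, return False, If not, then return True.
--     """
--     res = "".join(num.split("-"))
--     for i in range(len(res)):
--         try:
--             if (res[i] == res[i+1]):
--                 if (res[i+1] == res[i+2]):
--                     if (res[i+2] == res[i+3]):
--                         return False
--         except IndexError:
--            pass
--     return True
-- ===== SOURCE B (Python) =====
-- def val_rep(num):
--     """ If it has 4 or more consecutive repeated digits, return False, If not, then return True.
--     """
--     res = "".join(num.split("-"))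
--     run = 0
--     prev = None
--     for ch in res:
--         run = run + 1 if ch == prev else 1
--         if run >= 4:
--             return False
--         prev = ch
--     return True
-- ===== Notes on version B (the rewrite author's own statement) =====
-- stated objective: simpler
-- what changed: Replaces the index-window scan with try/except IndexError by a single pass maintaining a run-length counter that fails as soon as a run reaches 4.
import Mathlib
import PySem

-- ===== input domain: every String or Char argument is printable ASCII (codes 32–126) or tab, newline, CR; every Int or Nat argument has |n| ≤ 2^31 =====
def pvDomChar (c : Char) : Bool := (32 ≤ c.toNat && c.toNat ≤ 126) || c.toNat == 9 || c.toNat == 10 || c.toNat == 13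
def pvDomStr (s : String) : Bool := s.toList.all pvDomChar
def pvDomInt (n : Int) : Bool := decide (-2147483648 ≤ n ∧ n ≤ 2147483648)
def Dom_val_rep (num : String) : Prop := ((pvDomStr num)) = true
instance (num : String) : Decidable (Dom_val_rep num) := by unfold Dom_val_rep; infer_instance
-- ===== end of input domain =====

-- B replaces A's four-offset index-window scan (with try/except IndexError) by a single
-- pass maintaining a run-length counter; same cost, simpler.

-- ===== PORT A =====
-- the body of A's for-loop at index i: the nested ifs; pyGet? = none is the caught IndexError ('pass')
def valRepWindow (res : List Char) (i : Nat) : Bool :=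
  match PySem.List.pyGet? res (i : Int), PySem.List.pyGet? res ((i : Int) + 1),
        PySem.List.pyGet? res ((i : Int) + 2), PySem.List.pyGet? res ((i : Int) + 3) with
  | some a, some b, some c, some d => a == b && (b == c && c == d)
  | _, _, _, _ => false

def val_rep (num : String) : Bool :=
  let res := PySem.Chars.join [] (PySem.Chars.splitOn num.toList ['-'])
  if (List.range res.length).any (valRepWindow res) then false else true

-- ===== PORT B =====
-- the for-loop of Source B, state = (prev, run); returning False is the 'if run >= 4' early exit
def valRepRun : List Char → Option Char → Nat → Bool
  | [], _, _ => true
  | c :: rest, prev, run =>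
      let run' := if some c == prev then run + 1 else 1
      if run' ≥ 4 then false else valRepRun rest (some c) run'

def val_rep_alt (num : String) : Bool :=
  let res := PySem.Chars.join [] (PySem.Chars.splitOn num.toList ['-'])
  valRepRun res none 0

-- ===== PRECONDITION & SPEC =====
def Spec_val_rep (num : String) (out : Bool) : Prop := out = val_rep_alt num
instance (num : String) (out : Bool) : Decidable (Spec_val_rep num out) := by unfold Spec_val_rep; infer_instance

-- ===== CLAIM (what is proved, stated in full; the proofs are below) =====
def Claim_equal_val_rep : Prop := ∀ (num : String), Dom_val_rep num → Spec_val_rep num (val_rep num)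

-- ===== LEMMAS AND PROOFS =====

-- reference predicate: some window of 4 consecutive equal characters exists
def has4 : List Char → Bool
  | a :: b :: c :: d :: rest => (a == b && (b == c && c == d)) || has4 (b :: c :: d :: rest)
  | _ => false

-- A's window check with the pyGet? indices turned into plain Nat indexing
def windowG (res : List Char) (i : Nat) : Bool :=
  match res[i]?, res[i+1]?, res[i+2]?, res[i+3]? with
  | some a, some b, some c, some d => a == b && (b == c && c == d)
  | _, _, _, _ => false

lemma valRepWindow_eq_windowG (res : List Char) (i : Nat) :
    valRepWindow res i = windowG res i := by
  unfold valRepWindow windowG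
  rw [show ((i : Nat) : Int) + 1 = ((i + 1 : Nat) : Int) by push_cast; ring,
      show ((i : Nat) : Int) + 2 = ((i + 2 : Nat) : Int) by push_cast; ring,
      show ((i : Nat) : Int) + 3 = ((i + 3 : Nat) : Int) by push_cast; ring]
  simp only [PySem.List.pyGet?_natCast]

lemma windowG_cons_succ (x : Char) (xs : List Char) (i : Nat) :
    windowG (x :: xs) (i + 1) = windowG xs i := by
  unfold windowG
  rw [show i + 1 + 1 = (i + 1) + 1 from rfl, show i + 1 + 2 = (i + 2) + 1 by omega,
      show i + 1 + 3 = (i + 3) + 1 by omega]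
  simp only [List.getElem?_cons_succ]

lemma any_congr' (l : List Nat) (f g : Nat → Bool) (h : ∀ x ∈ l, f x = g x) :
    l.any f = l.any g := by
  induction l with
  | nil => rfl
  | cons a t ih => simp only [List.any_cons, h a (by simp), ih (fun x hx => h x (by simp [hx]))]

lemma any_window_eq_has4 (res : List Char) :
    (List.range res.length).any (valRepWindow res) = has4 res := by
  have hG : ∀ (l : List Char), (List.range l.length).any (valRepWindow l) =
      (List.range l.length).any (windowG l) :=
    fun l => any_congr' _ _ _ (fun i _ => valRepWindow_eq_windowG l i)
  rw [hG]
  induction res with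
  | nil => simp [has4]
  | cons x xs ih =>
      rw [List.length_cons, List.range_succ_eq_map, List.any_cons, List.any_map]
      rw [show ((windowG (x :: xs)) ∘ Nat.succ) = fun i => windowG (x :: xs) (i + 1) from rfl]
      rw [any_congr' _ _ _ (fun i _ => windowG_cons_succ x xs i), ih]
      match xs with
      | [] => simp [windowG, has4]
      | [b] => simp [windowG, has4]
      | [b, c] => simp [windowG, has4]
      | b :: c :: d :: rest => simp [windowG, has4]

-- a prefix of a run is a run
lemma take_replicate_mono (p : Char) (xs : List Char) (j k : Nat) (hjk : j ≤ k)
    (h : xs.take k = List.replicate k p) : xs.take j = List.replicate j p := by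
  have : xs.take j = (xs.take k).take j := by rw [List.take_take, Nat.min_eq_left hjk]
  rw [this, h, List.take_replicate, Nat.min_eq_left hjk]

-- unrolling has4 one step: a run of 4 either starts at the head or lies in the tail
lemma has4_cons (c : Char) (rest : List Char) :
    has4 (c :: rest) = (decide (rest.take 3 = List.replicate 3 c) || has4 rest) := by
  match rest with
  | [] => simp [has4]
  | [b] => simp [has4]
  | [b, c2] => simp [has4]
  | b :: c2 :: d :: t =>
      apply Bool.eq_iff_iff.mpr
      simp [has4, List.replicate]
      constructor
      · rintro (⟨h1, h2, h3⟩ | h)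
        · exact Or.inl ⟨h1.symm, h2.symm.trans h1.symm, h3.symm.trans (h2.symm.trans h1.symm)⟩
        · exact Or.inr h
      · rintro (⟨h1, h2, h3⟩ | h)
        · exact Or.inl ⟨h1.symm, h1.trans h2.symm, h2.trans h3.symm⟩
        · exact Or.inr h

-- invariant of B's loop: run ≤ 3 is the length of the current run, p its character
lemma valRepRun_some (xs : List Char) : ∀ (p : Char) (run : Nat), run ≤ 3 →
    valRepRun xs (some p) run =
      !(decide (xs.take (4 - run) = List.replicate (4 - run) p) || has4 xs) := by
  induction xs with
  | nil =>
      intro p run hrun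
      have h0 : 4 - run ≠ 0 := by omega
      rw [show valRepRun [] (some p) run = true from rfl]
      simp [has4]
      exact h0
  | cons c rest ih =>
      intro p run hrun
      by_cases hcp : c = p
      · subst hcp
        by_cases h3 : run = 3
        · subst h3
          rw [show valRepRun (c :: rest) (some c) 3 = false from by rw [valRepRun]; norm_num]
          simp [List.replicate]
        · have hle : run + 1 ≤ 3 := by omega
          have hstep : valRepRun (c :: rest) (some c) run = valRepRun rest (some c) (run + 1) := by
            rw [valRepRun]
            simp only [beq_self_eq_true, if_true, ge_iff_le]
            rw [if_neg (by omega)]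
          have h4 : 4 - run = (3 - run) + 1 := by omega
          have h4' : 4 - (run + 1) = 3 - run := by omega
          rw [hstep, ih c (run + 1) hle, h4', h4, has4_cons]
          simp only [List.take_succ_cons, List.replicate_succ, List.cons.injEq, true_and]
          by_cases hB : rest.take 3 = List.replicate 3 c
          · have hA : rest.take (3 - run) = List.replicate (3 - run) c :=
              take_replicate_mono c rest (3 - run) 3 (by omega) hB
            simp [hA, hB]
          · simp [List.replicate] at hB ⊢
            simp [hB]
      · have hstep : valRepRun (c :: rest) (some p) run = valRepRun rest (some c) 1 := by
          rw [valRepRun]; simp [hcp]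
        rw [hstep, ih c 1 (by omega), show (4 : Nat) - 1 = 3 from rfl, has4_cons]
        rw [show 4 - run = (3 - run) + 1 by omega]
        simp [List.replicate_succ, hcp]

lemma valRepRun_eq_not_has4 (res : List Char) : valRepRun res none 0 = !has4 res := by
  match res with
  | [] => simp [valRepRun, has4]
  | c :: rest =>
      have hstep : valRepRun (c :: rest) none 0 = valRepRun rest (some c) 1 := by
        rw [valRepRun]; norm_num
      rw [hstep, valRepRun_some rest c 1 (by omega), has4_cons]

-- ===== VERDICT (by name: the statement is the Claim_ definition above) =====
theorem val_rep_spec : Claim_equal_val_rep := by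
  intro num _
  show val_rep num = val_rep_alt num
  simp only [val_rep, val_rep_alt]
  rw [any_window_eq_has4, valRepRun_eq_not_has4]
  cases has4 (PySem.Chars.join [] (PySem.Chars.splitOn num.toList ['-'])) <;> rfl
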